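-- pv_equiv track=rewrite | github.com/bakajstep/KNN_Project2024 | inference_model.py | word_positions
-- ===== SOURCE A (Python) =====
-- def word_positions(text):
--     words = text.split()
--     positions = []
--     current_pos = 0
--     for word in words:
--         start = text.index(word, current_pos)
--         end = start + len(word)
--         positions.append((start, end))
--         current_pos = end
--     return words, positions
-- ===== SOURCE B (Python) =====
-- def word_positions(text):
--     words = []
--     positions = []
--     cur = []
--     for i, ch in enumerate(text):
--         if ch.isspace():
--             if cur:
--                 words.append("".join(cur))
--                 positions.append((i - len(cur), i))
--                 cur = []
--         else:
--             cur.append(ch)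
--     if cur:
--         n = len(text)
--         words.append("".join(cur))
--         positions.append((n - len(cur), n))
--     return words, positions
-- ===== Notes on version B (the rewrite author's own statement) =====
-- stated objective: alternative
-- what changed: A calls text.split() and then re-locates every word with text.index(word, current_pos); B is a single forward character scan that accumulates the current word and emits each word with its (start, end) when whitespace (or the end of the string) closes it, never re-searching the text.
import Mathlib
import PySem

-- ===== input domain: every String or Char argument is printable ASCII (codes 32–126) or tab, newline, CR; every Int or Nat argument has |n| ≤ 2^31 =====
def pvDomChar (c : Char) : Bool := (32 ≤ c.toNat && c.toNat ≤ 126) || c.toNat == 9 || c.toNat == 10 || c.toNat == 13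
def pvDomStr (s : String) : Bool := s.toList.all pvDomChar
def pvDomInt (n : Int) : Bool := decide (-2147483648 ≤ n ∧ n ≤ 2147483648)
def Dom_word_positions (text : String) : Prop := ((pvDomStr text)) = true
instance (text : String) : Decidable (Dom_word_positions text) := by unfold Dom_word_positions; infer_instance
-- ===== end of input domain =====

-- B replaces A's split-then-re-search (str.split + a text.index call per word) by a single
-- forward character scan that emits each word and its (start, end) as it is delimited
-- (an alternative one-pass algorithm; not claimed faster).


-- ===== PORT A =====
-- text.index(word, current_pos) always succeeds here (each split word occurs at or after
-- current_pos), so Str.findFrom (= str.find, identical where found) is an exact port.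
def word_positions (text : String) : List String × (List (Int × Int)) :=
  let words := PySem.Str.split₀ text
  let res := words.foldl (fun (st : List (Int × Int) × Int) word =>
    let start := PySem.Str.findFrom text word st.2
    let end_ := start + PySem.Str.len word
    (st.1 ++ [(start, end_)], end_)) ([], 0)
  (words, res.1)

-- ===== PORT B =====
-- loop body of Source B: state = (words, positions, cur)
def bstep (st : List String × List (Int × Int) × List Char) (p : Int × Char) :
    List String × List (Int × Int) × List Char :=
  if PySem.Chars.isspace p.2 then
    if st.2.2.isEmpty then st
    else (st.1 ++ [String.ofList st.2.2], st.2.1 ++ [(p.1 - st.2.2.length, p.1)], [])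
  else (st.1, st.2.1, st.2.2 ++ [p.2])

def word_positions_alt (text : String) : List String × (List (Int × Int)) :=
  let res := (PySem.List.enumerate text.toList 0).foldl bstep ([], [], [])
  if res.2.2.isEmpty then (res.1, res.2.1)
  else
    (res.1 ++ [String.ofList res.2.2],
     res.2.1 ++ [(PySem.Str.len text - res.2.2.length, PySem.Str.len text)])

-- ===== PRECONDITION & SPEC =====
def Spec_word_positions (text : String) (out : List String × (List (Int × Int))) : Prop := out = word_positions_alt text
instance (text : String) (out : List String × (List (Int × Int))) : Decidable (Spec_word_positions text out) := by unfold Spec_word_positions; infer_instance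

-- ===== CLAIM (what is proved, stated in full; the proofs are below) =====
def Claim_equal_word_positions : Prop := ∀ (text : String), Dom_word_positions text → Spec_word_positions text (word_positions text)

-- ===== LEMMAS AND PROOFS =====

-- common specification: the whitespace-delimited words of cs, and their positions from offset k
def nonWs (c : Char) : Bool := !PySem.Chars.isspace c

def Wwords : List Char → List (List Char)
  | [] => []
  | c :: cs =>
      if PySem.Chars.isspace c then Wwords cs
      else (c :: cs.takeWhile nonWs) :: Wwords (cs.dropWhile nonWs)
  termination_by cs => cs.length
  decreasing_by
  · simp
  · have := List.length_dropWhile_le nonWs cs; simp; omega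

def Wpos : List Char → Int → List (Int × Int)
  | [], _ => []
  | c :: cs, k =>
      if PySem.Chars.isspace c then Wpos cs (k + 1)
      else (k, k + 1 + (cs.takeWhile nonWs).length) ::
        Wpos (cs.dropWhile nonWs) (k + 1 + (cs.takeWhile nonWs).length)
  termination_by cs _ => cs.length
  decreasing_by
  · simp
  · have := List.length_dropWhile_le nonWs cs; simp; omega

lemma Wwords_shape : ∀ cs w, w ∈ Wwords cs → ∃ d t, w = d :: t ∧ PySem.Chars.isspace d = false := by
  intro cs
  induction cs using Wwords.induct with
  | case1 => simp [Wwords]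
  | case2 c cs hc ih => intro w hw; rw [Wwords, if_pos hc] at hw; exact ih w hw
  | case3 c cs hc ih =>
    intro w hw
    rw [Wwords, if_neg hc] at hw
    rcases List.mem_cons.1 hw with h | h
    · exact ⟨c, _, h, by simpa using hc⟩
    · exact ih w h

lemma Wpos_nil_of_Wwords_nil : ∀ cs (k : Int), Wwords cs = [] → Wpos cs k = [] := by
  intro cs
  induction cs using Wwords.induct with
  | case1 => simp [Wpos]
  | case2 c cs hc ih => intro k h; rw [Wwords, if_pos hc] at h; rw [Wpos, if_pos hc]; exact ih _ h
  | case3 c cs hc ih => intro k h; rw [Wwords, if_neg hc] at h; simp at h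

lemma go_acc : ∀ (cs cur : List Char) (acc : List (List Char)),
    PySem.Chars.split₀.go cs cur acc = acc.reverse ++ PySem.Chars.split₀.go cs cur [] := by
  intro cs
  induction cs with
  | nil => intro cur acc; rw [PySem.Chars.split₀.go, PySem.Chars.split₀.go]; split_ifs <;> simp
  | cons c cs ih =>
    intro cur acc
    rw [PySem.Chars.split₀.go]
    conv_rhs => rw [PySem.Chars.split₀.go]
    split_ifs with h1 h2
    · rw [ih [] acc]
    · rw [ih [] (cur.reverse :: acc), ih [] [cur.reverse]]
      simp
    · rw [ih (c :: cur) acc]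

lemma go_word : ∀ (cs : List Char) (cur : List Char), cur ≠ [] →
    PySem.Chars.split₀.go cs cur [] =
      (cur.reverse ++ cs.takeWhile nonWs) :: PySem.Chars.split₀.go (cs.dropWhile nonWs) [] [] := by
  intro cs
  induction cs with
  | nil =>
    intro cur hcur
    rw [PySem.Chars.split₀.go.eq_def]
    simp only [List.isEmpty_iff, if_neg hcur]
    rw [PySem.Chars.split₀.go.eq_def]
    simp
  | cons c cs ih =>
    intro cur hcur
    rw [PySem.Chars.split₀.go]
    by_cases hc : PySem.Chars.isspace c = true
    · rw [if_pos hc, if_neg (by simpa using hcur)]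
      rw [go_acc, List.takeWhile_cons, List.dropWhile_cons]
      simp [nonWs, hc]
      rw [PySem.Chars.split₀.go]
      simp [hc]
    · rw [if_neg hc, ih (c :: cur) (by simp)]
      rw [List.takeWhile_cons, List.dropWhile_cons]
      simp [nonWs, hc]

lemma split₀_eq_Wwords : ∀ cs : List Char, PySem.Chars.split₀ cs = Wwords cs := by
  intro cs
  induction cs using Wwords.induct with
  | case1 => rw [Wwords]; rw [PySem.Chars.split₀, PySem.Chars.split₀.go]; simp
  | case2 c cs hc ih =>
    rw [Wwords, if_pos hc, ← ih]
    rw [PySem.Chars.split₀, PySem.Chars.split₀, PySem.Chars.split₀.go, if_pos hc]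
    simp
  | case3 c cs hc ih =>
    rw [Wwords, if_neg hc, ← ih]
    rw [PySem.Chars.split₀, PySem.Chars.split₀, PySem.Chars.split₀.go, if_neg hc]
    rw [go_word cs [c] (by simp)]
    simp

-- ---- find facts ----
lemma find_go_lb (sub : List Char) : ∀ (s : List Char) (k : Nat),
    PySem.Chars.find.go sub s k = -1 ∨ (k : Int) ≤ PySem.Chars.find.go sub s k := by
  intro s
  induction s with
  | nil => intro k; rw [PySem.Chars.find.go]; split_ifs <;> simp
  | cons h t ih =>
    intro k
    rw [PySem.Chars.find.go]
    split_ifs with hp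
    · right; simp
    · rcases ih (k+1) with h1 | h1
      · left; exact h1
      · right; refine le_trans ?_ h1; push_cast; omega

lemma find_go_shift (sub : List Char) : ∀ (s : List Char) (k : Nat),
    PySem.Chars.find.go sub s k =
      if PySem.Chars.find.go sub s 0 = -1 then -1 else (k : Int) + PySem.Chars.find.go sub s 0 := by
  intro s
  induction s with
  | nil => intro k; rw [PySem.Chars.find.go, PySem.Chars.find.go]; split_ifs <;> simp_all
  | cons h t ih =>
    intro k
    rw [PySem.Chars.find.go]
    conv_rhs => rw [PySem.Chars.find.go]
    by_cases hp : sub.isPrefixOf (h :: t) = true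
    · simp [hp]
    · simp only [hp, Bool.false_eq_true, if_false]
      rw [ih (k+1), ih 1]
      have hlb := find_go_lb sub t 0
      generalize PySem.Chars.find.go sub t 0 = g at hlb ⊢
      push_cast
      split_ifs <;> omega

lemma find_cons_not_prefix {sub : List Char} {h : Char} {t : List Char}
    (hp : sub.isPrefixOf (h :: t) = false) :
    PySem.Chars.find (h :: t) sub =
      if PySem.Chars.find t sub = -1 then -1 else 1 + PySem.Chars.find t sub := by
  simp only [PySem.Chars.find]
  rw [PySem.Chars.find.go, if_neg (by simp [hp])]
  rw [find_go_shift sub t 1]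
  norm_num

lemma find_self (c : Char) (t r : List Char) :
    PySem.Chars.find ((c :: t) ++ r) (c :: t) = 0 := by
  simp only [PySem.Chars.find]
  rw [List.cons_append, PySem.Chars.find.go, if_pos ?_]
  · norm_num
  · rw [List.isPrefixOf_iff_prefix, ← List.cons_append]
    exact List.prefix_append _ _

-- ---- A's position loop ----
def Ago : List (List Char) → List Char → Int → List (Int × Int)
  | [], _, _ => []
  | w :: wl, s, cp =>
      let st := PySem.Chars.findFrom s w cp
      (st, st + w.length) :: Ago wl s (st + w.length)

lemma foldA_eq (text : String) : ∀ (wl : List (List Char)) (pos : List (Int × Int)) (cp : Int),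
    (((wl.map String.ofList).foldl (fun (st : List (Int × Int) × Int) word =>
        let start := PySem.Str.findFrom text word st.2
        let end_ := start + PySem.Str.len word
        (st.1 ++ [(start, end_)], end_)) (pos, cp)).1) = pos ++ Ago wl text.toList cp := by
  intro wl
  induction wl with
  | nil => intro pos cp; simp [Ago]
  | cons w wl ih =>
    intro pos cp
    simp only [List.map_cons, List.foldl_cons]
    rw [ih]
    rw [Ago]
    simp [PySem.Str.findFrom_eq, PySem.Str.len_eq, String.toList_ofList, List.append_assoc]

lemma Ago_skip {w : List Char} (wl : List (List Char)) {T : List Char} {k : Nat}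
    {c : Char} {X : List Char} (hdrop : T.drop k = c :: X) (hc : PySem.Chars.isspace c = true)
    {d : Char} {t : List Char} (hw : w = d :: t) (hd : PySem.Chars.isspace d = false) :
    Ago (w :: wl) T (k : Int) = Ago (w :: wl) T ((k : Int) + 1) := by
  have hk1 : k < T.length := by
    have := congrArg List.length hdrop
    simp [List.length_drop] at this
    omega
  have hdk : T.drop (k + 1) = X := by
    have h1 : T.drop (k + 1) = (T.drop k).drop 1 := by
      rw [List.drop_drop]
    rw [h1, hdrop]
    simp
  have hst : PySem.Chars.findFrom T w (k : Int) = PySem.Chars.findFrom T w ((k : Int) + 1) := by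
    rw [PySem.Chars.findFrom_natCast T w k (le_of_lt hk1)]
    rw [show ((k : Int) + 1) = ((k + 1 : Nat) : Int) by push_cast; ring]
    rw [PySem.Chars.findFrom_natCast T w (k + 1) (by omega)]
    rw [hdrop, hdk, hw]
    have hne : (d == c) = false := by
      refine beq_eq_false_iff_ne.2 ?_
      intro e
      rw [e, hc] at hd
      cases hd
    rw [find_cons_not_prefix (by simp [List.isPrefixOf, hne])]
    have hlb := find_go_lb (d :: t) X 0
    simp only [PySem.Chars.find]
    generalize PySem.Chars.find.go (d :: t) X 0 = g at hlb ⊢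
    rcases hlb with h1 | h1 <;> split_ifs <;> push_cast <;> omega
  rw [Ago]
  conv_rhs => rw [Ago]
  rw [hst]

lemma Ago_spec : ∀ n rest pre, rest.length = n →
    Ago (Wwords rest) (pre ++ rest) (pre.length : Int) = Wpos rest (pre.length : Int) := by
  intro n
  induction n using Nat.strong_induction_on with
  | _ n ih =>
    intro rest pre hlen
    cases rest with
    | nil => simp [Wwords, Wpos, Ago]
    | cons c cs =>
      by_cases hc : PySem.Chars.isspace c = true
      · rw [Wwords, if_pos hc, Wpos, if_pos hc]
        rcases hW : Wwords cs with _ | ⟨w, wl⟩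
        · simp [Ago, Wpos_nil_of_Wwords_nil cs _ hW]
        · obtain ⟨d, t, hwdt, hd⟩ := Wwords_shape cs w (by rw [hW]; simp)
          have hdrop : (pre ++ c :: cs).drop pre.length = c :: cs := by
            simp
          rw [Ago_skip wl hdrop hc hwdt hd]
          have hIH := ih cs.length (by simp at hlen; omega) cs (pre ++ [c]) rfl
          rw [hW] at hIH
          simpa [List.append_assoc] using hIH
      · rw [Wwords, if_neg hc, Wpos, if_neg hc, Ago]
        have hsplit : cs = cs.takeWhile nonWs ++ cs.dropWhile nonWs :=
          (List.takeWhile_append_dropWhile).symm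
        have hdrop : (pre ++ c :: cs).drop pre.length = c :: cs := by
          simp
        have hfind : PySem.Chars.findFrom (pre ++ c :: cs) (c :: cs.takeWhile nonWs)
            (pre.length : Int) = (pre.length : Int) := by
          rw [PySem.Chars.findFrom_natCast _ _ pre.length (by simp)]
          rw [hdrop]
          rw [show c :: cs = (c :: cs.takeWhile nonWs) ++ cs.dropWhile nonWs by
            rw [List.cons_append, ← hsplit]]
          rw [find_self]
          norm_num
        rw [hfind]
        have hrlen : (cs.dropWhile nonWs).length < n := by
          have := List.length_dropWhile_le nonWs cs
          simp at hlen
          omega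
        have hIH := ih (cs.dropWhile nonWs).length hrlen (cs.dropWhile nonWs)
          (pre ++ c :: cs.takeWhile nonWs) rfl
        have htext : (pre ++ c :: cs.takeWhile nonWs) ++ cs.dropWhile nonWs = pre ++ c :: cs := by
          conv_rhs => rw [hsplit]
          simp
        have harg : (((pre ++ c :: cs.takeWhile nonWs).length : Nat) : Int)
            = (pre.length : Int) + 1 + ((cs.takeWhile nonWs).length : Int) := by
          simp
          ring
        rw [htext, harg] at hIH
        rw [show ((pre.length : Int) + (((c :: cs.takeWhile nonWs).length : Nat) : Int))
          = (pre.length : Int) + 1 + ((cs.takeWhile nonWs).length : Int) by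
            simp only [List.length_cons]; push_cast; omega]
        rw [hIH]

-- ---- B's scan ----
def Bfinal (n : Int) (st : List String × List (Int × Int) × List Char) :
    List String × List (Int × Int) :=
  if st.2.2.isEmpty then (st.1, st.2.1)
  else (st.1 ++ [String.ofList st.2.2], st.2.1 ++ [(n - st.2.2.length, n)])

lemma dropWhile_head_space {l : List Char} {d : Char} {r : List Char}
    (h : l.dropWhile nonWs = d :: r) : PySem.Chars.isspace d = true := by
  induction l with
  | nil => simp at h
  | cons a l ih =>
    rw [List.dropWhile_cons] at h
    split_ifs at h with ha
    · exact ih h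
    · cases h
      simpa [nonWs] using ha

lemma B_run : ∀ (t : List Char), (∀ x ∈ t, nonWs x) → ∀ (r : List Char) (k : Int)
    (cur : List Char) (ws : List String) (pos : List (Int × Int)),
    (PySem.List.enumerate (t ++ r) k).foldl bstep (ws, pos, cur) =
      (PySem.List.enumerate r (k + t.length)).foldl bstep (ws, pos, cur ++ t) := by
  intro t
  induction t with
  | nil => intro _ r k cur ws pos; simp
  | cons x t ih =>
    intro ht r k cur ws pos
    have hx : nonWs x = true := ht x (by simp)
    have hxs : PySem.Chars.isspace x = false := by
      simpa [nonWs] using hx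
    rw [List.cons_append,
      show PySem.List.enumerate (x :: (t ++ r)) k = (k, x) :: PySem.List.enumerate (t ++ r) (k + 1)
        from rfl,
      List.foldl_cons]
    have hbs : bstep (ws, pos, cur) (k, x) = (ws, pos, cur ++ [x]) := by
      simp [bstep, hxs]
    rw [hbs, ih (fun y hy => ht y (by simp [hy])) r (k + 1)]
    have h1 : (k + 1) + (t.length : Int) = k + ((x :: t).length : Int) := by
      simp only [List.length_cons]; push_cast; omega
    have h2 : (cur ++ [x]) ++ t = cur ++ x :: t := by simp
    rw [h1, h2]

lemma B_main : ∀ n cs (k : Int) ws pos, cs.length = n →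
    Bfinal (k + cs.length) ((PySem.List.enumerate cs k).foldl bstep (ws, pos, [])) =
      (ws ++ (Wwords cs).map String.ofList, pos ++ Wpos cs k) := by
  intro n
  induction n using Nat.strong_induction_on with
  | _ n ih =>
    intro cs k ws pos hlen
    cases cs with
    | nil =>
      show Bfinal _ (ws, pos, []) = _
      simp [Bfinal, Wwords, Wpos]
    | cons c cs =>
      rw [show PySem.List.enumerate (c :: cs) k = (k, c) :: PySem.List.enumerate cs (k + 1)
        from rfl, List.foldl_cons]
      by_cases hc : PySem.Chars.isspace c = true
      · have hbs : bstep (ws, pos, []) (k, c) = (ws, pos, []) := by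
          simp [bstep, hc]
        rw [hbs, Wwords, if_pos hc, Wpos, if_pos hc]
        have harg : (k + ((c :: cs).length : Int)) = (k + 1) + (cs.length : Int) := by
          simp only [List.length_cons]; push_cast; omega
        rw [harg, ih cs.length (by simp at hlen; omega) cs (k + 1) ws pos rfl]
      · have hbs : bstep (ws, pos, []) (k, c) = (ws, pos, [c]) := by
          simp [bstep, hc]
        rw [hbs, Wwords, if_neg hc, Wpos, if_neg hc]
        rw [show PySem.List.enumerate cs (k + 1)
            = PySem.List.enumerate (cs.takeWhile nonWs ++ cs.dropWhile nonWs) (k + 1) by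
          rw [List.takeWhile_append_dropWhile]]
        rw [B_run (cs.takeWhile nonWs) (fun y hy => List.mem_takeWhile_imp hy)
          (cs.dropWhile nonWs) (k + 1) [c] ws pos]
        have hsplit : cs = cs.takeWhile nonWs ++ cs.dropWhile nonWs :=
          (List.takeWhile_append_dropWhile).symm
        cases hrr : cs.dropWhile nonWs with
        | nil =>
          have hcs : cs.length = (cs.takeWhile nonWs).length := by
            conv_lhs => rw [hsplit]
            rw [hrr, List.append_nil]
          have hn : (k + (((c :: cs).length : Nat) : Int))
              = k + 1 + ((cs.takeWhile nonWs).length : Int) := by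
            simp only [List.length_cons]
            push_cast
            omega
          show Bfinal (k + (((c :: cs).length : Nat) : Int)) (ws, pos, [c] ++ cs.takeWhile nonWs) = _
          rw [hn, Bfinal, if_neg (by simp)]
          rw [Wwords, Wpos]
          simp only [List.map_cons, List.map_nil, List.singleton_append, List.length_cons]
          refine Prod.ext rfl ?_
          show _ ++ [_] = _ ++ [_]
          congr 3
          push_cast
          omega
        | cons d r' =>
          have hd : PySem.Chars.isspace d = true := dropWhile_head_space hrr
          rw [show PySem.List.enumerate (d :: r') ((k + 1) + ((cs.takeWhile nonWs).length : Int))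
              = ((k + 1) + ((cs.takeWhile nonWs).length : Int), d)
                :: PySem.List.enumerate r' ((k + 1) + ((cs.takeWhile nonWs).length : Int) + 1)
              from rfl, List.foldl_cons]
          have hbs2 : bstep (ws, pos, [c] ++ cs.takeWhile nonWs)
              ((k + 1) + ((cs.takeWhile nonWs).length : Int), d)
              = (ws ++ [String.ofList (c :: cs.takeWhile nonWs)],
                 pos ++ [(k, (k + 1) + ((cs.takeWhile nonWs).length : Int))], []) := by
            rw [bstep]
            rw [if_pos (by simpa using hd), if_neg (by simp)]
            simp only [List.cons_append, List.nil_append]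
            congr 3
            simp only [List.length_cons]
            push_cast
            ring
          rw [hbs2]
          have hlen' : r'.length < n := by
            have h1 := congrArg List.length hsplit
            rw [hrr] at h1
            simp at h1 hlen
            omega
          have hIH := ih r'.length hlen' r' ((k + 1) + ((cs.takeWhile nonWs).length : Int) + 1)
            (ws ++ [String.ofList (c :: cs.takeWhile nonWs)])
            (pos ++ [(k, (k + 1) + ((cs.takeWhile nonWs).length : Int))]) rfl
          have harg : (k + ((c :: cs).length : Int))
              = ((k + 1) + ((cs.takeWhile nonWs).length : Int) + 1) + (r'.length : Int) := by
            have h1 := congrArg List.length hsplit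
            rw [hrr] at h1
            simp only [List.length_cons, List.length_append] at h1 ⊢
            push_cast
            omega
          rw [harg, hIH]
          rw [show Wpos (d :: r') ((k + 1) + ((cs.takeWhile nonWs).length : Int))
            = Wpos r' ((k + 1) + ((cs.takeWhile nonWs).length : Int) + 1) by
              rw [Wpos, if_pos hd],
            show Wwords (d :: r') = Wwords r' by rw [Wwords, if_pos hd]]
          simp [List.append_assoc]

lemma altB (text : String) :
    word_positions_alt text = ((Wwords text.toList).map String.ofList, Wpos text.toList 0) := by
  have h0 : word_positions_alt text
      = Bfinal (PySem.Str.len text)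
          ((PySem.List.enumerate text.toList 0).foldl bstep ([], [], [])) := by
    rfl
  rw [h0, PySem.Str.len_eq,
    show ((text.toList.length : Nat) : Int) = 0 + (text.toList.length : Int) by ring]
  rw [B_main text.toList.length text.toList 0 [] [] rfl]
  simp

lemma portA (text : String) :
    word_positions text = ((Wwords text.toList).map String.ofList, Wpos text.toList 0) := by
  rw [word_positions]
  have hw : PySem.Str.split₀ text = (Wwords text.toList).map String.ofList := by
    rw [PySem.Str.split₀, split₀_eq_Wwords]
  simp only [hw]
  refine Prod.ext rfl ?_
  show (((Wwords text.toList).map String.ofList).foldl _ ([], 0)).1 = _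
  rw [foldA_eq text (Wwords text.toList) [] 0]
  have h := Ago_spec text.toList.length text.toList [] rfl
  simp only [List.nil_append, List.length_nil, Nat.cast_zero] at h
  simp [h]

-- ===== VERDICT (by name: the statement is the Claim_ definition above) =====
theorem word_positions_spec : Claim_equal_word_positions := by
  intro text _
  show _ = _
  rw [portA, altB]
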